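-- pv_equiv track=rewrite | github.com/VidhyaPonnusamy-gce/Mount-Blue-job-challenge-codes | Mount-blue-sec9-7.py | lady_ugs
-- ===== SOURCE A (Python) =====
-- def lady_ugs(b):
--     f={}
--     for i in b:
--         if i in f:
--             f[i]+=1
--         else:
--             f[i]=1
--     if '_' not in b:
--         for i in range(len(b)):
--             if (i>0 and b[i]==b[i-1])or(i<len(b)-1 and b[i]==b[i+1]):
--                 continue
--             else:
--                 return "NO"
--         return "YES"
--     for key ,value in f.items():
--         if key!='_' and value==1:
--             return "NO"
--     return "YES"
-- ===== SOURCE B (Python) =====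
-- def lady_ugs(b):
--     # One unified rule: canonicalize (sort when '_' is present, so each character's
--     # occurrences become one contiguous run, i.e. run length = total count), then
--     # demand that every run not made of '_' has length >= 2.
--     s = b if '_' not in b else ''.join(sorted(b))
--     k = 0
--     while k < len(s):
--         i = k + 1
--         while i < len(s) and s[i] == s[k]:
--             i += 1
--         if s[k] != '_' and i - k < 2:
--             return "NO"
--         k = i
--     return "YES"
-- ===== Notes on version B (the rewrite author's own statement) =====
-- stated objective: alternative
-- what changed: B replaces A's two unrelated checks (per-index neighbor comparisons, and a frequency dict scanned for count-1 keys) by a single rule applied after a canonicalization step: sort the string when an underscore is present (so a character's count becomes its run length) and then verify with one run-scan loop that every run not made of underscores has length >= 2.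
import Mathlib
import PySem

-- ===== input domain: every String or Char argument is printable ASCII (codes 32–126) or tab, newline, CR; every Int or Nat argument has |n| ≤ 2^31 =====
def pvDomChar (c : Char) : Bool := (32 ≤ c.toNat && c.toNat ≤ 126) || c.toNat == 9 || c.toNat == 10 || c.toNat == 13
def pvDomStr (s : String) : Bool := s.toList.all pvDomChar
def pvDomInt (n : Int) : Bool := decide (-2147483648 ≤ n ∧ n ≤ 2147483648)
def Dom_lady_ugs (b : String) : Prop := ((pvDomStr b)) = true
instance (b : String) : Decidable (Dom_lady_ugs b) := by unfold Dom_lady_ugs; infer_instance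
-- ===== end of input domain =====

-- B replaces A's two separate checks (neighbor comparisons, frequency dict) by one rule
-- applied after sorting when '_' is present (objective: alternative algorithm, same answer).

-- ===== PORT A =====
-- the frequency dict: 'if i in f: f[i]+=1 else f[i]=1'
def ladyDict (l : List Char) : PySem.Dict Char Int :=
  l.foldl (fun f i =>
    match f.get? i with
    | some v => f.insert i (v + 1)
    | none => f.insert i 1) PySem.Dict.empty

-- 'for i in range(len(b)): if (i>0 and b[i]==b[i-1]) or (i<len(b)-1 and b[i]==b[i+1]): continue else: return "NO"'
-- (range(len(b)) indices are in range, so getD is exact for b[i], b[i-1], b[i+1])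
def ladyLoop1 (l : List Char) : List Nat → String
  | [] => "YES"
  | i :: rest =>
    if ((decide (0 < i)) && (l.getD i ' ' == l.getD (i - 1) ' ')) ||
       ((decide (i < l.length - 1)) && (l.getD i ' ' == l.getD (i + 1) ' ')) then
      ladyLoop1 l rest
    else "NO"

-- 'for key, value in f.items(): if key != '_' and value == 1: return "NO"'
def ladyLoop2 : List (Char × Int) → String
  | [] => "YES"
  | (k, v) :: rest => if k != '_' && v == 1 then "NO" else ladyLoop2 rest

-- '_' not in b : single-character needle, so substring membership = character membership (exact)
def lady_ugs (b : String) : String :=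
  let l := b.toList
  let f := ladyDict l
  if !(l.contains '_') then ladyLoop1 l (List.range l.length)
  else ladyLoop2 f.items

-- ===== PORT B =====
-- Source B's run-scan loop over the suffix starting at k: the inner 'while i < len(s) and s[i] == s[k]'
-- counts the run of s[k] (= takeWhile scan, run length = takeWhile.length + 1); 'k = i' moves to the
-- rest after the run (= dropWhile), i.e. the tail loop is structural recursion on the suffix;
-- continue iff s[k] == '_' or run length >= 2, else "NO"; loop exhausted = "YES"
def okRun : List Char → Bool
  | [] => true
  | c :: rest =>
    ((c == '_') || decide (2 ≤ (rest.takeWhile (· == c)).length + 1)) &&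
      okRun (rest.dropWhile (· == c))
  termination_by l => l.length
  decreasing_by
    simp only [List.length_cons]
    exact Nat.lt_succ_of_le (List.length_dropWhile_le _ _)

-- "s = b if '_' not in b else ''.join(sorted(b))" — sorted(b) over chars is sorted with the
-- identity key (exact on ASCII: Char order = code-point order)
def lady_ugs_alt (b : String) : String :=
  let l := b.toList
  let s := if l.contains '_' then PySem.List.sorted l (fun x => x) false else l
  if okRun s then "YES" else "NO"

-- ===== PRECONDITION & SPEC =====
def Spec_lady_ugs (b : String) (out : String) : Prop := out = lady_ugs_alt b
instance (b : String) (out : String) : Decidable (Spec_lady_ugs b out) := by unfold Spec_lady_ugs; infer_instance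

-- ===== CLAIM (what is proved, stated in full; the proofs are below) =====
def Claim_equal_lady_ugs : Prop := ∀ (b : String), Dom_lady_ugs b → Spec_lady_ugs b (lady_ugs b)

-- ===== LEMMAS AND PROOFS =====

-- the neighbor condition of A's first loop, generalized by the element to the left of position 0
def AP (p : Option Char) (l : List Char) : Prop :=
  ∀ i, (h : i < l.length) → ((if i = 0 then p else l[i-1]?) = some l[i]) ∨ (l[i+1]? = some l[i])

theorem AP_nil (p : Option Char) : AP p [] := by
  intro i h; simp at h

theorem AP_cons (p : Option Char) (c : Char) (rest : List Char) :
    AP p (c :: rest) ↔ ((p = some c ∨ rest[0]? = some c) ∧ AP (some c) rest) := by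
  constructor
  · intro h
    refine ⟨?_, ?_⟩
    · have h0 := h 0 (by simp)
      simpa using h0
    · intro i hi
      have hj := h (i + 1) (by simpa using Nat.succ_lt_succ hi)
      rcases hj with hj | hj
      · left
        cases i with
        | zero => simpa using hj
        | succ k => simpa using hj
      · right; simpa using hj
  · rintro ⟨h0, h⟩
    intro i hi
    cases i with
    | zero =>
      rcases h0 with h0 | h0
      · left; simpa using h0
      · right; simpa using h0
    | succ k =>
      have hk : k < rest.length := by simpa using Nat.lt_of_succ_lt_succ hi
      have hj := h k hk
      rcases hj with hj | hj
      · left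
        cases k with
        | zero => simpa using hj
        | succ m => simpa using hj
      · right; simpa using hj

theorem ladyLoop1_yes (l : List Char) (is : List Nat) :
    ladyLoop1 l is = "YES" ↔ ∀ i ∈ is,
      (((decide (0 < i)) && (l.getD i ' ' == l.getD (i - 1) ' ')) ||
       ((decide (i < l.length - 1)) && (l.getD i ' ' == l.getD (i + 1) ' '))) = true := by
  induction is with
  | nil => simp [ladyLoop1]
  | cons i rest ih =>
    unfold ladyLoop1
    by_cases hc : (((decide (0 < i)) && (l.getD i ' ' == l.getD (i - 1) ' ')) ||
       ((decide (i < l.length - 1)) && (l.getD i ' ' == l.getD (i + 1) ' '))) = true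
    · rw [if_pos hc, ih]
      constructor
      · intro h j hj
        rcases List.mem_cons.mp hj with rfl | hj
        · exact hc
        · exact h j hj
      · intro h j hj
        exact h j (List.mem_cons_of_mem _ hj)
    · rw [if_neg hc]
      constructor
      · intro h; exact absurd h (by simp)
      · intro h; exact absurd (h i (List.mem_cons_self)) hc

-- the per-index condition of A's loop is the generalized neighbor predicate with no left context
theorem cond_iff_AP (l : List Char) :
    (∀ i ∈ List.range l.length,
      (((decide (0 < i)) && (l.getD i ' ' == l.getD (i - 1) ' ')) ||
       ((decide (i < l.length - 1)) && (l.getD i ' ' == l.getD (i + 1) ' '))) = true)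
    ↔ AP none l := by
  constructor
  · intro h i hi
    have hc := h i (List.mem_range.mpr hi)
    rcases Bool.or_eq_true_iff.mp hc with hc | hc
    · rcases Bool.and_eq_true_iff.mp hc with ⟨h1, h2⟩
      have hi0 : 0 < i := by simpa using h1
      have him : i - 1 < l.length := lt_of_le_of_lt (Nat.sub_le _ _) hi
      left
      have : l.getD i ' ' = l.getD (i - 1) ' ' := by simpa using h2
      rw [List.getD_eq_getElem _ _ hi, List.getD_eq_getElem _ _ him] at this
      simp [if_neg (Nat.pos_iff_ne_zero.mp hi0), List.getElem?_eq_getElem him, this]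
    · rcases Bool.and_eq_true_iff.mp hc with ⟨h1, h2⟩
      have hi1 : i + 1 < l.length := by
        have := of_decide_eq_true h1
        omega
      right
      have : l.getD i ' ' = l.getD (i + 1) ' ' := by simpa using h2
      rw [List.getD_eq_getElem _ _ hi, List.getD_eq_getElem _ _ hi1] at this
      simp [List.getElem?_eq_getElem hi1, this]
  · intro h i hi
    have hi' : i < l.length := List.mem_range.mp hi
    rcases h i hi' with hc | hc
    · apply Bool.or_eq_true_iff.mpr; left
      cases i with
      | zero => simp at hc
      | succ k =>
        have him : k < l.length := by omega
        simp only [Nat.succ_ne_zero, List.getElem?_eq_getElem him,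
          Nat.add_sub_cancel] at hc
        apply Bool.and_eq_true_iff.mpr
        refine ⟨by simp, ?_⟩
        rw [List.getD_eq_getElem _ _ hi', List.getD_eq_getElem _ _ (by omega : k + 1 - 1 < l.length)]
        simp only [Nat.add_sub_cancel]
        simpa [beq_iff_eq] using hc.symm
    · apply Bool.or_eq_true_iff.mpr; right
      have hi1 : i + 1 < l.length := by
        by_contra hn
        rw [List.getElem?_eq_none (by omega)] at hc
        simp at hc
      rw [List.getElem?_eq_getElem hi1, Option.some.injEq] at hc
      apply Bool.and_eq_true_iff.mpr
      refine ⟨by simp; omega, ?_⟩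
      rw [List.getD_eq_getElem _ _ hi', List.getD_eq_getElem _ _ hi1]
      simpa [beq_iff_eq] using hc.symm

-- a run of c's to the left does not change the generalized condition
theorem AP_run (c : Char) (d : List Char) :
    ∀ t : List Char, (∀ x ∈ t, x = c) → (AP (some c) (t ++ d) ↔ AP (some c) d) := by
  intro t
  induction t with
  | nil => intro _; simp
  | cons x t' ih =>
    intro hall
    have hx : x = c := hall x (by simp)
    subst hx
    rw [List.cons_append, AP_cons]
    constructor
    · rintro ⟨_, h⟩; exact (ih (fun y hy => hall y (by simp [hy]))).mp h
    · intro h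
      exact ⟨Or.inl rfl, (ih (fun y hy => hall y (by simp [hy]))).mpr h⟩

-- at a run boundary the left context is irrelevant
theorem AP_newrun (c : Char) (d : List Char) (hd : d.head? ≠ some c) :
    AP (some c) d ↔ AP none d := by
  cases d with
  | nil => simp [AP_nil]
  | cons e d' =>
    have hne : c ≠ e := by
      intro h; subst h; simp at hd
    rw [AP_cons, AP_cons]
    constructor
    · rintro ⟨h0, h⟩
      refine ⟨?_, h⟩
      rcases h0 with h0 | h0
      · exact absurd (by simpa using h0) hne
      · exact Or.inr h0
    · rintro ⟨h0, h⟩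
      refine ⟨?_, h⟩
      rcases h0 with h0 | h0
      · simp at h0
      · exact Or.inr h0

theorem head?_dropWhile_ne (c : Char) : ∀ l : List Char,
    (l.dropWhile (· == c)).head? ≠ some c := by
  intro l
  induction l with
  | nil => simp
  | cons x r ih =>
    by_cases hx : x = c
    · subst hx; simpa using ih
    · simp [hx]

theorem mem_of_dropWhile {p : Char → Bool} {l : List Char} {x : Char}
    (h : x ∈ l.dropWhile p) : x ∈ l :=
  (List.dropWhile_sublist p).subset h

-- on an underscore-free list, B's unified run check decides exactly A's neighbor condition
theorem okRun_iff_AP : ∀ l : List Char, '_' ∉ l → (okRun l = true ↔ AP none l) := by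
  intro l
  induction hn : l.length using Nat.strong_induction_on generalizing l with
  | _ n ih =>
    intro hund
    cases l with
    | nil => simp [okRun, AP_nil]
    | cons c rest =>
      subst hn
      have hc_ : ¬ (c = '_') := fun h => hund (by simp [h])
      have hund' : '_' ∉ rest.dropWhile (· == c) := fun h =>
        hund (List.mem_cons_of_mem _ (mem_of_dropWhile h))
      have hdlen : (rest.dropWhile (· == c)).length < (c :: rest).length := by
        have := List.length_dropWhile_le (· == c) rest
        simp only [List.length_cons]; omega
      have hall : ∀ x ∈ rest.takeWhile (· == c), x = c := by
        intro x hx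
        simpa [beq_iff_eq] using List.mem_takeWhile_imp hx
      have hsplit := List.takeWhile_append_dropWhile (p := (· == c)) (l := rest)
      rw [okRun]
      rw [Bool.and_eq_true, Bool.or_eq_true, beq_iff_eq, decide_eq_true_iff]
      rw [ih _ hdlen _ rfl hund']
      rw [AP_cons]
      have hAPeq : AP (some c) rest ↔ AP none (rest.dropWhile (· == c)) := by
        conv_lhs => rw [← hsplit]
        rw [AP_run c _ _ hall, AP_newrun c _ (head?_dropWhile_ne c rest)]
      constructor
      · rintro ⟨hcond, h⟩
        rcases hcond with hcond | hcond
        · exact absurd hcond hc_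
        · have htk : rest.takeWhile (· == c) ≠ [] := by
            intro he; rw [he] at hcond; simp at hcond
          have h0 : rest[0]? = some c := by
            cases hr : rest with
            | nil => simp [hr] at htk
            | cons e r =>
              have : e = c := by
                by_contra hne
                rw [hr] at htk; simp [hne] at htk
              simp [this]
          exact ⟨Or.inr h0, hAPeq.mpr h⟩
      · rintro ⟨h0, h⟩
        refine ⟨?_, hAPeq.mp h⟩
        rcases h0 with h0 | h0
        · simp at h0
        · right
          cases hr : rest with
          | nil => rw [hr] at h0; simp at h0
          | cons e r =>
            rw [hr] at h0
            have he : e = c := by simpa using h0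
            subst he
            simp
      
-- on a sorted list, B's run check decides "every non-underscore element occurs at least twice"
theorem okRun_sorted_iff : ∀ t : List Char, t.Pairwise (· ≤ ·) →
    (okRun t = true ↔ ∀ c ∈ t, c = '_' ∨ 2 ≤ t.count c) := by
  intro t
  induction hn : t.length using Nat.strong_induction_on generalizing t with
  | _ n ih =>
    intro hsort
    cases t with
    | nil => simp [okRun]
    | cons c rest =>
      subst hn
      have hall : ∀ x ∈ rest.takeWhile (· == c), x = c := by
        intro x hx
        simpa [beq_iff_eq] using List.mem_takeWhile_imp hx
      have hsplit := List.takeWhile_append_dropWhile (p := (· == c)) (l := rest)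
      set dr := rest.dropWhile (· == c) with hdr
      have hdlen : dr.length < (c :: rest).length := by
        have := List.length_dropWhile_le (· == c) rest
        simp only [List.length_cons, hdr]; omega
      have hdsort : dr.Pairwise (· ≤ ·) :=
        (List.pairwise_cons.mp hsort).2.sublist (List.dropWhile_sublist _)
      -- every element of dr is strictly greater than c
      have hgt : ∀ x ∈ dr, c < x := by
        intro x hx
        have hle : c ≤ x :=
          (List.pairwise_cons.mp hsort).1 x (mem_of_dropWhile hx)
        rcases lt_or_eq_of_le hle with h | h
        · exact h
        · exfalso
          cases hd : dr with
          | nil => rw [hd] at hx; simp at hx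
          | cons e d' =>
            have hec : c ≤ e := (List.pairwise_cons.mp hsort).1 e
              (mem_of_dropWhile (p := (· == c)) (by rw [← hdr, hd]; simp))
            have hee : e ≠ c := by
              have := head?_dropWhile_ne c rest
              rw [← hdr, hd] at this; simpa using this
            have hce : c < e := lt_of_le_of_ne hec (fun hh => hee hh.symm)
            rw [hd] at hx
            rcases List.mem_cons.mp hx with rfl | hx
            · exact hee h.symm
            · have : e ≤ x := (List.pairwise_cons.mp (hd ▸ hdsort)).1 x hx
              subst h
              exact absurd hce (not_lt_of_ge this)
      have hnotm : c ∉ dr := fun h => lt_irrefl c (hgt c h)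
      -- counts in c :: rest
      have hcount_c : (c :: rest).count c = (rest.takeWhile (· == c)).length + 1 := by
        rw [List.count_cons_self]
        conv_lhs => rw [← hsplit]
        rw [List.count_append]
        have h1 : (rest.takeWhile (· == c)).count c = (rest.takeWhile (· == c)).length :=
          List.count_eq_length.mpr (fun x hx => by rw [hall x hx])
        have h2 : dr.count c = 0 := List.count_eq_zero.mpr hnotm
        omega
      have hcount_ne : ∀ x, x ≠ c → (c :: rest).count x = dr.count x := by
        intro x hx
        rw [List.count_cons_of_ne hx.symm]
        conv_lhs => rw [← hsplit]
        rw [List.count_append]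
        have h1 : (rest.takeWhile (· == c)).count x = 0 :=
          List.count_eq_zero.mpr (fun h => hx (hall x h))
        omega
      have hmem : ∀ x, x ∈ (c :: rest) ↔ x = c ∨ x ∈ dr := by
        intro x
        constructor
        · intro h
          rcases List.mem_cons.mp h with rfl | h
          · exact Or.inl rfl
          · rw [← hsplit] at h
            rcases List.mem_append.mp h with h | h
            · exact Or.inl (hall x h)
            · exact Or.inr h
        · intro h
          rcases h with rfl | h
          · exact List.mem_cons_self
          · exact List.mem_cons_of_mem _ (mem_of_dropWhile h)
      rw [okRun]
      rw [Bool.and_eq_true, Bool.or_eq_true, beq_iff_eq, decide_eq_true_iff]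
      rw [ih _ hdlen _ rfl hdsort]
      constructor
      · rintro ⟨hcond, h⟩ x hx
        rcases (hmem x).mp hx with rfl | hx
        · rcases hcond with hcond | hcond
          · exact Or.inl hcond
          · right; rw [hcount_c]; omega
        · have hxne : x ≠ c := fun hh => hnotm (hh ▸ hx)
          rcases h x hx with h' | h'
          · exact Or.inl h'
          · right; rw [hcount_ne x hxne]; exact h'
      · intro h
        constructor
        · rcases h c List.mem_cons_self with h' | h'
          · exact Or.inl h'
          · right; rw [hcount_c] at h'; omega
        · intro x hx
          have hxne : x ≠ c := fun hh => hnotm (hh ▸ hx)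
          rcases h x ((hmem x).mpr (Or.inr hx)) with h' | h'
          · exact Or.inl h'
          · right; rw [← hcount_ne x hxne]; exact h'

-- A's dict-building loop is collections.Counter
theorem ladyDict_eq_counter (l : List Char) : ladyDict l = PySem.Dict.counter l := by
  rw [← PySem.Dict.foldl_insert_getD_add_one_eq_counter]
  unfold ladyDict
  congr 1
  funext f i
  cases hg : f.get? i with
  | none => simp [PySem.Dict.getD_eq_get?_getD, hg]
  | some v => simp [PySem.Dict.getD_eq_get?_getD, hg]

theorem ladyLoop2_eq_any (xs : List (Char × Int)) :
    ladyLoop2 xs = if xs.any (fun p => p.1 != '_' && p.2 == 1) then "NO" else "YES" := by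
  induction xs with
  | nil => simp [ladyLoop2]
  | cons p rest ih =>
    obtain ⟨k, v⟩ := p
    by_cases hc : (k != '_' && v == 1) = true
    · simp [ladyLoop2, hc]
    · have hf : (k != '_' && v == 1) = false := by simpa using hc
      simp [ladyLoop2, hf, ih]

theorem ladyLoop1_cases (l : List Char) (is : List Nat) :
    ladyLoop1 l is = "YES" ∨ ladyLoop1 l is = "NO" := by
  induction is with
  | nil => left; rfl
  | cons i rest ih =>
    unfold ladyLoop1
    split
    · exact ih
    · right; rfl

-- ===== VERDICT (by name: the statement is the Claim_ definition above) =====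
theorem lady_ugs_spec : Claim_equal_lady_ugs := by
  intro b _
  unfold Spec_lady_ugs lady_ugs lady_ugs_alt
  set l := b.toList with hl
  by_cases hund : l.contains '_'
  · -- underscore branch: A scans Counter items; B checks runs in the sorted list
    simp only [hund, Bool.not_true, Bool.false_eq_true, ite_false, ite_true]
    rw [ladyDict_eq_counter, ladyLoop2_eq_any, PySem.Dict.items_counter]
    set s := PySem.List.sorted l (fun x => x) false with hs
    have hperm : s.Perm l := PySem.List.sorted_perm l (fun x => x) false
    have hsort : s.Pairwise (· ≤ ·) := PySem.List.sorted_pairwise l (fun x => x)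
    -- A is NO iff some non-underscore char of l has count 1
    have hA : ((PySem.Set.ofList l).map (fun k => (k, (l.count k : Int)))).any
        (fun p => p.1 != '_' && p.2 == 1) = true ↔
        ∃ x ∈ l, x ≠ '_' ∧ l.count x = 1 := by
      rw [List.any_map, List.any_eq_true]
      constructor
      · rintro ⟨x, hx, hp⟩
        simp only [Function.comp_apply, Bool.and_eq_true, bne_iff_ne, beq_iff_eq] at hp
        refine ⟨x, (PySem.Set.mem_ofList _ _).mp hx, hp.1, ?_⟩
        exact_mod_cast hp.2
      · rintro ⟨x, hx, hne, hcnt⟩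
        refine ⟨x, (PySem.Set.mem_ofList _ _).mpr hx, ?_⟩
        simp only [Function.comp_apply, Bool.and_eq_true, bne_iff_ne, beq_iff_eq]
        exact ⟨hne, by exact_mod_cast hcnt⟩
    -- B is YES iff every non-underscore char of l has count ≥ 2
    have hB : okRun s = true ↔ ∀ c ∈ l, c = '_' ∨ 2 ≤ l.count c := by
      rw [okRun_sorted_iff s hsort]
      constructor
      · intro h c hc
        rcases h c (hperm.mem_iff.mpr hc) with h' | h'
        · exact Or.inl h'
        · right; rwa [hperm.count_eq] at h'
      · intro h c hc
        rcases h c (hperm.mem_iff.mp hc) with h' | h'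
        · exact Or.inl h'
        · right; rwa [hperm.count_eq]
    by_cases hno : ∃ x ∈ l, x ≠ '_' ∧ l.count x = 1
    · rw [if_pos (hA.mpr hno)]
      have : okRun s = false := by
        rcases hno with ⟨x, hx, hne, hcnt⟩
        by_contra hok
        have := (hB.mp (Bool.not_eq_false _ ▸ Bool.of_not_eq_false hok)) x hx
        rcases this with h' | h'
        · exact hne h'
        · omega
      rw [this]; simp
    · rw [if_neg (fun h => hno (hA.mp h))]
      have : okRun s = true := by
        apply hB.mpr
        intro c hc
        by_cases hce : c = '_'
        · exact Or.inl hce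
        · right
          have h1 : 1 ≤ l.count c := List.one_le_count_iff.mpr hc
          rcases Nat.lt_or_ge (l.count c) 2 with h2 | h2
          · exact absurd ⟨c, hc, hce, by omega⟩ hno
          · exact h2
      rw [this]; simp
  · -- no-underscore branch: A's neighbor loop vs B's run check on l itself
    simp only [hund, Bool.not_false, ite_true, Bool.false_eq_true, ite_false]
    have hund' : '_' ∉ l := by simpa using hund
    rcases hok : okRun l with _ | _
    · have hap : ¬ AP none l := fun h => by
        rw [(okRun_iff_AP l hund').mpr h] at hok; exact Bool.noConfusion hok
      have : ladyLoop1 l (List.range l.length) = "NO" := by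
        rcases ladyLoop1_cases l (List.range l.length) with h | h
        · exact absurd ((cond_iff_AP l).mp ((ladyLoop1_yes l _).mp h)) hap
        · exact h
      simp [this]
    · have hap : AP none l := (okRun_iff_AP l hund').mp hok
      rw [(ladyLoop1_yes l (List.range l.length)).mpr ((cond_iff_AP l).mpr hap)]
      simp
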